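-- pv_equiv track=rewrite | github.com/NakulK48/aoc-2023 | problem_13.py | get_mirror_index
-- ===== SOURCE A (Python) =====
-- def get_mirror_index(iterable: list[str]) -> int | None:
--     for mirror_idx in range(1, len(iterable)):
--         distance = min(mirror_idx, len(iterable) - mirror_idx)
--         to_left = iterable[(mirror_idx - distance) : mirror_idx][::-1]
--         to_right = iterable[mirror_idx : mirror_idx + distance]
--         if to_left == to_right:
--             return mirror_idx
--     return None
-- ===== SOURCE B (Python) =====
-- def get_mirror_index(iterable: list[str]) -> int | None:
--     n = len(iterable)
--     for i in range(1, n):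
--         if iterable[i - 1] != iterable[i]:
--             continue
--         # expand outward with two pointers from the adjacent equal pair
--         l, r = i - 2, i + 1
--         while l >= 0 and r < n and iterable[l] == iterable[r]:
--             l -= 1
--             r += 1
--         if l < 0 or r >= n:
--             return i
--     return None
-- ===== Notes on version B (the rewrite author's own statement) =====
-- stated objective: alternative
-- what changed: Instead of slicing, reversing and comparing whole sublists at every candidate index, B filters candidates to adjacent equal pairs and expands outward with two pointers, succeeding exactly when the expansion reaches a boundary.
import Mathlib
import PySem

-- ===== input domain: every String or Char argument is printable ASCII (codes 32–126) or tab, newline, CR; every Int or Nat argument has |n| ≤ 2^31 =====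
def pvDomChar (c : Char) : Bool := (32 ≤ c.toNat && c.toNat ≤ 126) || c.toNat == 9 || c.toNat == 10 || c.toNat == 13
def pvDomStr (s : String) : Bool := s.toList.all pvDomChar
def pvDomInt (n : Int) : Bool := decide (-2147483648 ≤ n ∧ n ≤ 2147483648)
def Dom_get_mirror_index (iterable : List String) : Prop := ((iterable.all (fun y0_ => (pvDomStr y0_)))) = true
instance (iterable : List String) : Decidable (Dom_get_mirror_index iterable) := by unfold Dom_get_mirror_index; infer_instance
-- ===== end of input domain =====

-- B replaces A's per-index slice/reverse/compare with a two-pointer outward expansion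
-- from adjacent-equal-pair candidates (objective: alternative algorithm, early-exit expansion).

-- ===== PORT A =====
-- 'for mirror_idx in range(1, len(iterable))' as structural recursion on remaining fuel
def pvLoopA (xs : List String) : Nat → Nat → Option Int
  | 0, _ => none
  | fuel + 1, i =>
    if i < xs.length then
      let distance : Int := min (i : Int) ((xs.length : Int) - (i : Int))
      -- xs[(i - distance) : i][::-1]  (slice?[::-1] is reverse, PySem.List.slice?_none_none_neg_one)
      let to_left : List String := (PySem.List.slice xs (some ((i : Int) - distance)) (some (i : Int))).reverse
      let to_right : List String := PySem.List.slice xs (some (i : Int)) (some ((i : Int) + distance))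
      if to_left = to_right then some (i : Int) else pvLoopA xs fuel (i + 1)
    else none

def get_mirror_index (iterable : List String) : Option Int := pvLoopA iterable iterable.length 1

-- ===== PORT B =====
-- the 'while l >= 0 and r < n and iterable[l] == iterable[r]' loop, fuel-structural
def pvExpand (xs : List String) : Nat → Int → Int → Int × Int
  | 0, l, r => (l, r)
  | fuel + 1, l, r =>
    if 0 ≤ l ∧ r < (xs.length : Int) ∧ PySem.List.pyGet? xs l = PySem.List.pyGet? xs r then
      pvExpand xs fuel (l - 1) (r + 1)
    else (l, r)

def pvLoopB (xs : List String) : Nat → Nat → Option Int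
  | 0, _ => none
  | fuel + 1, i =>
    if i < xs.length then
      if PySem.List.pyGet? xs ((i : Int) - 1) = PySem.List.pyGet? xs (i : Int) then
        let p := pvExpand xs i ((i : Int) - 2) ((i : Int) + 1)
        if p.1 < 0 ∨ (xs.length : Int) ≤ p.2 then some (i : Int) else pvLoopB xs fuel (i + 1)
      else pvLoopB xs fuel (i + 1)
    else none

def get_mirror_index_alt (iterable : List String) : Option Int := pvLoopB iterable iterable.length 1

-- ===== PRECONDITION & SPEC =====
def Spec_get_mirror_index (iterable : List String) (out : Option Int) : Prop := out = get_mirror_index_alt iterable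
instance (iterable : List String) (out : Option Int) : Decidable (Spec_get_mirror_index iterable out) := by unfold Spec_get_mirror_index; infer_instance

-- ===== CLAIM (what is proved, stated in full; the proofs are below) =====
def Claim_equal_get_mirror_index : Prop := ∀ (iterable : List String), Dom_get_mirror_index iterable → Spec_get_mirror_index iterable (get_mirror_index iterable)

-- ===== LEMMAS AND PROOFS =====

-- the mirror condition at split i, pairs from offset j outward (Nat indices)
def pvP (xs : List String) (i j : Nat) : Prop :=
  ∀ k : Nat, j ≤ k → k < min i (xs.length - i) → xs[i - 1 - k]? = xs[i + k]?

lemma pv_expand_iff (xs : List String) (i : Nat) (hi : 1 ≤ i) (hin : i < xs.length) :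
    ∀ fuel j, min i (xs.length - i) - j ≤ fuel →
      (((pvExpand xs fuel ((i : Int) - 1 - (j : Int)) ((i : Int) + (j : Int))).1 < 0 ∨
        ((xs.length : Int)) ≤ (pvExpand xs fuel ((i : Int) - 1 - (j : Int)) ((i : Int) + (j : Int))).2)
       ↔ pvP xs i j) := by
  intro fuel
  induction fuel with
  | zero =>
    intro j hfuel
    have hjd : min i (xs.length - i) ≤ j := by omega
    simp only [pvExpand]
    constructor
    · intro _ k hk hkd; omega
    · intro _; omega
  | succ f ih =>
    intro j hfuel
    by_cases hjd : min i (xs.length - i) ≤ j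
    · simp only [pvExpand]
      rw [if_neg (by rintro ⟨h1, h2, h3⟩; omega)]
      constructor
      · intro _ k hk hkd; omega
      · intro _; omega
    · rw [not_le] at hjd
      have hl0 : (0 : Int) ≤ (i : Int) - 1 - (j : Int) := by omega
      have hr0 : (0 : Int) ≤ (i : Int) + (j : Int) := by omega
      have hrn : (i : Int) + (j : Int) < (xs.length : Int) := by omega
      have tl : ((i : Int) - 1 - (j : Int)).toNat = i - 1 - j := by omega
      have tr : ((i : Int) + (j : Int)).toNat = i + j := by omega
      have hgl : PySem.List.pyGet? xs ((i : Int) - 1 - (j : Int)) = xs[i - 1 - j]? := by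
        rw [PySem.List.pyGet?_of_nonneg xs hl0, tl]
      have hgr : PySem.List.pyGet? xs ((i : Int) + (j : Int)) = xs[i + j]? := by
        rw [PySem.List.pyGet?_of_nonneg xs hr0, tr]
      by_cases hpair : xs[i - 1 - j]? = xs[i + j]?
      · simp only [pvExpand]
        rw [if_pos ⟨hl0, hrn, by rw [hgl, hgr, hpair]⟩]
        have e1 : (i : Int) - 1 - (j : Int) - 1 = (i : Int) - 1 - ((j + 1 : Nat) : Int) := by
          push_cast; ring
        have e2 : (i : Int) + (j : Int) + 1 = (i : Int) + ((j + 1 : Nat) : Int) := by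
          push_cast; ring
        rw [e1, e2, ih (j + 1) (by omega)]
        constructor
        · intro hp k hk hkd
          rcases Nat.eq_or_lt_of_le hk with h | h
          · have hkj : k = j := h.symm
            subst hkj; exact hpair
          · exact hp k (by omega) hkd
        · intro hp k hk hkd; exact hp k (by omega) hkd
      · simp only [pvExpand]
        rw [if_neg (by rintro ⟨h1, h2, h3⟩; exact hpair (by rw [← hgl, ← hgr]; exact h3))]
        constructor
        · intro h; exfalso; rcases h with h | h <;> omega
        · intro hp; exact absurd (hp j le_rfl (by omega)) hpair

lemma pv_condA_iff (xs : List String) (i : Nat) (hi : 1 ≤ i) (hin : i < xs.length) :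
    ((PySem.List.slice xs (some ((i : Int) - min (i : Int) ((xs.length : Int) - (i : Int)))) (some (i : Int))).reverse
      = PySem.List.slice xs (some (i : Int)) (some ((i : Int) + min (i : Int) ((xs.length : Int) - (i : Int)))))
    ↔ pvP xs i 0 := by
  have hd : min (i : Int) ((xs.length : Int) - (i : Int)) = ((min i (xs.length - i) : Nat) : Int) := by
    omega
  set d : Nat := min i (xs.length - i) with hdd
  have hdi : d ≤ i := by omega
  have hdn : d ≤ xs.length - i := by omega
  have h1 : (i : Int) - (d : Int) = ((i - d : Nat) : Int) := by omega
  have h2 : (i : Int) + (d : Int) = ((i + d : Nat) : Int) := by omega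
  rw [hd, h1, h2,
      PySem.List.slice_toNat xs (a := ((i - d : Nat) : Int)) (b := ((i : Nat) : Int)) (by omega) (by omega),
      PySem.List.slice_toNat xs (a := ((i : Nat) : Int)) (b := ((i + d : Nat) : Int)) (by omega) (by omega)]
  simp only [Int.toNat_natCast]
  have h3 : i - (i - d) = d := by omega
  have h4 : i + d - i = d := by omega
  rw [h3, h4]
  have hL : ∀ k : Nat, k < d → (((xs.drop (i - d)).take d).reverse)[k]? = xs[i - 1 - k]? := by
    intro k hk
    rw [List.getElem?_reverse (by simp only [List.length_take, List.length_drop]; omega)]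
    simp only [List.length_take, List.length_drop]
    have h5 : min d (xs.length - (i - d)) - 1 - k < d := by omega
    rw [List.getElem?_take_of_lt h5, List.getElem?_drop]
    congr 1; omega
  have hR : ∀ k : Nat, k < d → ((xs.drop i).take d)[k]? = xs[i + k]? := by
    intro k hk
    rw [List.getElem?_take_of_lt hk, List.getElem?_drop]
  constructor
  · intro heq k hk0 hkd
    have hk := congrArg (fun l => l[k]?) heq
    simp only at hk
    rw [hL k hkd, hR k hkd] at hk
    exact hk
  · intro hp
    apply List.ext_getElem?
    intro k
    by_cases hk : k < d
    · rw [hL k hk, hR k hk]; exact hp k (Nat.zero_le k) hk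
    · rw [List.getElem?_eq_none, List.getElem?_eq_none]
      · simp only [List.length_take, List.length_drop]; omega
      · simp only [List.length_reverse, List.length_take, List.length_drop]; omega

lemma pv_loop_eq (xs : List String) :
    ∀ fuel i, 1 ≤ i → pvLoopA xs fuel i = pvLoopB xs fuel i := by
  intro fuel
  induction fuel with
  | zero => intro i hi; rfl
  | succ f ih =>
    intro i hi
    by_cases hin : i < xs.length
    · simp only [pvLoopA, pvLoopB]
      rw [if_pos hin, if_pos hin]
      have hd1 : 1 ≤ min i (xs.length - i) := by omega
      have hcondA := pv_condA_iff xs i hi hin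
      have hpair0 : (PySem.List.pyGet? xs ((i : Int) - 1) = PySem.List.pyGet? xs (i : Int))
          ↔ xs[i - 1]? = xs[i]? := by
        rw [PySem.List.pyGet?_of_nonneg xs (by omega : (0:Int) ≤ (i : Int) - 1),
            PySem.List.pyGet?_of_nonneg xs (by omega : (0:Int) ≤ (i : Int))]
        have e : ((i : Int) - 1).toNat = i - 1 := by omega
        rw [e, Int.toNat_natCast]
      have hexp := pv_expand_iff xs i hi hin i 1 (by omega)
      have e1 : (i : Int) - 2 = (i : Int) - 1 - ((1 : Nat) : Int) := by push_cast; ring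
      have e2 : (i : Int) + 1 = (i : Int) + ((1 : Nat) : Int) := by push_cast; ring
      by_cases hp0 : xs[i - 1]? = xs[i]?
      · rw [if_pos (hpair0.mpr hp0)]
        by_cases hp1 : pvP xs i 1
        · rw [if_pos, if_pos]
          · dsimp only
            rw [e1, e2]
            exact hexp.mpr hp1
          · apply hcondA.mpr
            intro k hk0 hkd
            rcases Nat.eq_zero_or_pos k with h | h
            · subst h
              simpa using hp0
            · exact hp1 k h hkd
        · rw [if_neg, if_neg]
          · exact ih (i + 1) (by omega)
          · dsimp only
            rw [e1, e2, hexp]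
            exact hp1
          · intro hA
            exact hp1 (fun k hk hkd => hcondA.mp hA k (by omega) hkd)
      · rw [if_neg (fun h => hp0 (hpair0.mp h)), if_neg]
        · exact ih (i + 1) (by omega)
        · intro hA
          have h0 := hcondA.mp hA 0 le_rfl (by omega)
          simp only [Nat.sub_zero, Nat.add_zero] at h0
          exact hp0 h0
    · simp only [pvLoopA, pvLoopB]
      rw [if_neg hin, if_neg hin]

-- ===== VERDICT (by name: the statement is the Claim_ definition above) =====
theorem get_mirror_index_spec : Claim_equal_get_mirror_index := by
  intro xs _
  unfold Spec_get_mirror_index get_mirror_index get_mirror_index_alt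
  exact pv_loop_eq xs xs.length 1 (by omega)
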